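-- pv_equiv track=rewrite | github.com/aa-fahim/PracticePython | Ex36.BirthdayPlots.py | count_months
-- ===== SOURCE A (Python) =====
-- from collections import Counter
--
-- def count_months(birthdays):
--     months = []
--     num_of_months = {}
--
--     for name in birthdays:
--         month = birthdays[name].split('/')
--         months.append(month[0])
--
--     c = Counter(months)
--
--     num_of_months['January']    = c['01']
--     num_of_months['February']   = c['02']
--     num_of_months['March']      = c['03']
--     num_of_months['April']      = c['04']
--     num_of_months['May']        = c['05']
--     num_of_months['June']       = c['06']
--     num_of_months['July']       = c['07']
--     num_of_months['August']     = c['08']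
--     num_of_months['September']  = c['09']
--     num_of_months['October']    = c['10']
--     num_of_months['November']   = c['11']
--     num_of_months['December']   = c['12']
--
--     return num_of_months
-- ===== SOURCE B (Python) =====
-- MONTHS = [("01", "January"), ("02", "February"), ("03", "March"), ("04", "April"),
--           ("05", "May"), ("06", "June"), ("07", "July"), ("08", "August"),
--           ("09", "September"), ("10", "October"), ("11", "November"), ("12", "December")]
--
-- def count_months(birthdays):
--     dates = list(birthdays.values())
--     return {name: sum(1 for d in dates if d.split('/')[0] == code)
--             for code, name in MONTHS}
-- ===== Notes on version B (the rewrite author's own statement) =====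
-- stated objective: simpler
-- what changed: A makes one pass collecting month codes into a list, tallies them with a Counter, then writes twelve explicit assignments; B has no tally structure at all: it loops over the fixed month table and, for each month, counts the matching dates directly with a generator-sum scan (12 staged scans instead of one accumulating pass).
import Mathlib
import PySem

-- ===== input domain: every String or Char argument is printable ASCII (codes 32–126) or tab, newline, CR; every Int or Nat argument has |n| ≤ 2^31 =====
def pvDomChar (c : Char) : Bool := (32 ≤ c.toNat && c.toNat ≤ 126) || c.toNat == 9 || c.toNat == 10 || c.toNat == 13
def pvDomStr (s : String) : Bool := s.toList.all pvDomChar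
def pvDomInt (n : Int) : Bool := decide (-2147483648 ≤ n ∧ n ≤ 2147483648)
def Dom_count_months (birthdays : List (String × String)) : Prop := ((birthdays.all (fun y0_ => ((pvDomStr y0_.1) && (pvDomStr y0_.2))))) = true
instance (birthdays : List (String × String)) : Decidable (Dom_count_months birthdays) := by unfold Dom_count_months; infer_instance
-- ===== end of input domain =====

-- B drops A's tally structure entirely (code list, Counter, 12 assignments): it loops over a
-- fixed month table and counts each month's dates with a direct scan. Same return value.

-- shared one-liner: date.split('/')[0]  (split with a non-empty separator never returns
-- an empty list, so [0] is exactly the head; PySem.Str.split? is some for sep ≠ "")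
def pvCode (s : String) : String := ((PySem.Str.split? s "/").getD []).headD ""

-- ===== PORT A =====
def count_months (birthdays : List (String × String)) : List (String × Int) :=
  let d := PySem.Dict.mk birthdays          -- the dict argument itself
  -- for name in birthdays: months.append(birthdays[name].split('/')[0])
  let months := d.keys.foldl (fun acc name => acc ++ [pvCode (d.getD name "")]) []
  let c := PySem.Dict.counter months
  -- num_of_months['January'] = c['01']; …; num_of_months['December'] = c['12']
  let r := (((((((((((PySem.Dict.empty.insert "January" (c.getD "01" 0)).insert
    "February" (c.getD "02" 0)).insert "March" (c.getD "03" 0)).insert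
    "April" (c.getD "04" 0)).insert "May" (c.getD "05" 0)).insert
    "June" (c.getD "06" 0)).insert "July" (c.getD "07" 0)).insert
    "August" (c.getD "08" 0)).insert "September" (c.getD "09" 0)).insert
    "October" (c.getD "10" 0)).insert "November" (c.getD "11" 0)).insert
    "December" (c.getD "12" 0)
  r.items

-- ===== PORT B =====
-- the module-level MONTHS table of Source B
def pvMONTHS : List (String × String) :=
  [("01", "January"), ("02", "February"), ("03", "March"), ("04", "April"),
   ("05", "May"), ("06", "June"), ("07", "July"), ("08", "August"),
   ("09", "September"), ("10", "October"), ("11", "November"), ("12", "December")]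

def count_months_alt (birthdays : List (String × String)) : List (String × Int) :=
  -- dates = list(birthdays.values())
  let dates := (PySem.Dict.mk birthdays).values
  -- {name: sum(1 for d in dates if d.split('/')[0] == code) for code, name in MONTHS}
  (pvMONTHS.foldl (fun d cn =>
      d.insert cn.2 ((dates.countP (fun s => pvCode s == cn.1) : Nat) : Int))
    PySem.Dict.empty).items

-- ===== PRECONDITION & SPEC =====
-- Pre_ only says the association list encodes a Python dict: a dict argument never has
-- duplicate keys, so no input A accepts is excluded. (Bool recursion, so it decides fast.)
def pvKeysFresh : List String → Bool
  | [] => true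
  | k :: t => (!t.any (fun k' => k' == k)) && pvKeysFresh t
def Pre_count_months (birthdays : List (String × String)) : Prop :=
  pvKeysFresh (birthdays.map Prod.fst) = true
instance (birthdays : List (String × String)) : Decidable (Pre_count_months birthdays) := by
  unfold Pre_count_months; infer_instance
def pvWitness_count_months : (List (String × String)) :=
  [("Amy", "02/14/1990"), ("Bob", "13/01"), ("Cy", "02/01")]
def Spec_count_months (birthdays : List (String × String)) (out : List (String × Int)) : Prop := out = count_months_alt birthdays
instance (birthdays : List (String × String)) (out : List (String × Int)) : Decidable (Spec_count_months birthdays out) := by unfold Spec_count_months; infer_instance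

-- ===== CLAIM =====
def Claim_equal_count_months : Prop := ∀ (birthdays : List (String × String)), Dom_count_months birthdays → Pre_count_months birthdays → Spec_count_months birthdays (count_months birthdays)

-- ===== LEMMAS AND PROOFS =====

lemma pvKeysFresh_iff (l : List String) : pvKeysFresh l = true ↔ l.Nodup := by
  induction l with
  | nil => simp [pvKeysFresh]
  | cons k t ih =>
      simp only [pvKeysFresh, Bool.and_eq_true, Bool.not_eq_true', List.any_eq_false,
        beq_iff_eq, List.nodup_cons, ih]
      constructor
      · rintro ⟨h1, h2⟩; exact ⟨fun hm => h1 k hm rfl, h2⟩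
      · rintro ⟨h1, h2⟩; exact ⟨fun x hx hxk => h1 (hxk ▸ hx), h2⟩

-- A's months list is the codes of the values, in order
lemma pvMonths_eq (bs : List (String × String)) (h : (bs.map Prod.fst).Nodup) :
    (PySem.Dict.mk bs).keys.foldl
        (fun acc name => acc ++ [pvCode ((PySem.Dict.mk bs).getD name "")]) []
      = bs.map (fun kv => pvCode kv.2) := by
  have hnd : (PySem.Dict.mk bs).keys.Nodup := h
  rw [PySem.List.foldl_append_singleton_eq_map (fun name => pvCode ((PySem.Dict.mk bs).getD name ""))]
  have hv := PySem.Dict.values_eq_map_keys (PySem.Dict.mk bs) hnd ""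
  calc List.map (fun name => pvCode ((PySem.Dict.mk bs).getD name "")) (PySem.Dict.mk bs).keys
      = ((PySem.Dict.mk bs).keys.map (fun k => (PySem.Dict.mk bs).getD k "")).map pvCode := by
        rw [List.map_map]; rfl
    _ = (PySem.Dict.mk bs).values.map pvCode := by rw [← hv]
    _ = bs.map (fun kv => pvCode kv.2) := by
        simp [PySem.Dict.values, List.map_map]

-- A's insert chain, spelled out
lemma pvChain_items (c : PySem.Dict String Int) :
    ((((((((((((PySem.Dict.empty.insert "January" (c.getD "01" 0)).insert
    "February" (c.getD "02" 0)).insert "March" (c.getD "03" 0)).insert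
    "April" (c.getD "04" 0)).insert "May" (c.getD "05" 0)).insert
    "June" (c.getD "06" 0)).insert "July" (c.getD "07" 0)).insert
    "August" (c.getD "08" 0)).insert "September" (c.getD "09" 0)).insert
    "October" (c.getD "10" 0)).insert "November" (c.getD "11" 0)).insert
    "December" (c.getD "12" 0)).items =
    [("January", c.getD "01" 0), ("February", c.getD "02" 0), ("March", c.getD "03" 0),
     ("April", c.getD "04" 0), ("May", c.getD "05" 0), ("June", c.getD "06" 0),
     ("July", c.getD "07" 0), ("August", c.getD "08" 0), ("September", c.getD "09" 0),
     ("October", c.getD "10" 0), ("November", c.getD "11" 0), ("December", c.getD "12" 0)] := by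
  simp [PySem.Dict.items_insert, PySem.Dict.contains_insert, PySem.Dict.empty]

-- B's table fold, spelled out (dates generalized)
lemma pvAlt_items (dates : List String) :
    (pvMONTHS.foldl (fun d cn =>
        d.insert cn.2 ((dates.countP (fun s => pvCode s == cn.1) : Nat) : Int))
      PySem.Dict.empty).items =
    [("January", ((dates.countP (fun s => pvCode s == "01") : Nat) : Int)),
     ("February", ((dates.countP (fun s => pvCode s == "02") : Nat) : Int)),
     ("March", ((dates.countP (fun s => pvCode s == "03") : Nat) : Int)),
     ("April", ((dates.countP (fun s => pvCode s == "04") : Nat) : Int)),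
     ("May", ((dates.countP (fun s => pvCode s == "05") : Nat) : Int)),
     ("June", ((dates.countP (fun s => pvCode s == "06") : Nat) : Int)),
     ("July", ((dates.countP (fun s => pvCode s == "07") : Nat) : Int)),
     ("August", ((dates.countP (fun s => pvCode s == "08") : Nat) : Int)),
     ("September", ((dates.countP (fun s => pvCode s == "09") : Nat) : Int)),
     ("October", ((dates.countP (fun s => pvCode s == "10") : Nat) : Int)),
     ("November", ((dates.countP (fun s => pvCode s == "11") : Nat) : Int)),
     ("December", ((dates.countP (fun s => pvCode s == "12") : Nat) : Int))] := by
  simp [pvMONTHS, List.foldl_cons, List.foldl_nil,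
    PySem.Dict.items_insert, PySem.Dict.contains_insert, PySem.Dict.empty]

-- per-month agreement: Counter lookup over A's code list = B's direct scan of the values
lemma pvCnt (bs : List (String × String)) (code : String) :
    (PySem.Dict.counter (bs.map (fun kv => pvCode kv.2))).getD code 0
      = (((PySem.Dict.mk bs).values.countP (fun s => pvCode s == code) : Nat) : Int) := by
  rw [PySem.Dict.getD_counter]
  congr 1
  have h1 : (PySem.Dict.mk bs).values.countP (fun s => pvCode s == code)
      = ((PySem.Dict.mk bs).values.map pvCode).count code := by
    rw [List.count_eq_countP, List.countP_map]; rfl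
  rw [h1]
  have h2 : (PySem.Dict.mk bs).values.map pvCode = bs.map (fun kv => pvCode kv.2) := by
    simp [PySem.Dict.values, List.map_map]
  rw [h2]

-- ===== VERDICT =====
theorem count_months_spec : Claim_equal_count_months := by
  intro bs _ hpre
  have hnod : (bs.map Prod.fst).Nodup := (pvKeysFresh_iff _).mp hpre
  unfold Spec_count_months
  simp only [count_months, count_months_alt]
  rw [pvMonths_eq bs hnod, pvChain_items, pvAlt_items]
  simp only [pvCnt]
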